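-- pv_equiv track=rewrite | github.com/srutherford2000/advent_of_code_2023 | 12_09/12_09.py | find_both_next
-- ===== SOURCE A (Python) =====
-- def find_both_next(nums):
--     rounds = [nums]
--     current_round = 0
--
--     while all([i == 0 for i in rounds[current_round]]) is False:
--         new_round = []
--         for i in range(1, len(rounds[current_round])):
--             new_round.append(rounds[current_round][i] - rounds[current_round][i-1])
--         rounds.append(new_round)
--         current_round += 1
--
--     rounds[current_round].append(0)
--     rounds[current_round].append(0)
--     current_round -= 1
--
--     while current_round >= 0:
--         rounds[current_round].append(rounds[current_round][-1] + rounds[current_round+1][-1])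
--         rounds[current_round] = [rounds[current_round][0] - rounds[current_round+1][0]] + rounds[current_round]
--         current_round -= 1
--
--     return (rounds[0][-1], rounds[0][0])
-- ===== SOURCE B (Python) =====
-- def find_both_next(nums):
--     # Newton forward/backward closed form: one O(n) pass, no difference table.
--     n = len(nums)
--     nxt = prv = 0
--     c = 1                       # C(n, i)
--     s = 1 if n % 2 else -1      # (-1) ** (n - 1 - i)
--     t = 1                       # (-1) ** i
--     for i, a in enumerate(nums):
--         c2 = c * (n - i) // (i + 1)     # C(n, i + 1)
--         nxt += s * c * a
--         prv += t * c2 * a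
--         c, s, t = c2, -s, -t
--     return (nxt, prv)
-- ===== Notes on version B (the rewrite author's own statement) =====
-- stated objective: faster
-- what changed: Replaced the O(n^2) finite-difference table (built row by row, then extended both ways) by the Newton forward/backward binomial-coefficient closed form computed in a single O(n) pass with incrementally updated C(n,i).
import Mathlib
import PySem

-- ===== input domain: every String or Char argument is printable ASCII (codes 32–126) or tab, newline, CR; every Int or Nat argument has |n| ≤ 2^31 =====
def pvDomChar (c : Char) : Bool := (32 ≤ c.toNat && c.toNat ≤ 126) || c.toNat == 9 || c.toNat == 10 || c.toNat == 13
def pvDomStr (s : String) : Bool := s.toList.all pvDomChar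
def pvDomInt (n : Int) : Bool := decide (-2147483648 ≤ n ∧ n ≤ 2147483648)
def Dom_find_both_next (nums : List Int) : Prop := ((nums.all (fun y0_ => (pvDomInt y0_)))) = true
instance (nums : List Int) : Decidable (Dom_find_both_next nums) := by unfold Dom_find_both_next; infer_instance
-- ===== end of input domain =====

-- B replaces A's O(n^2) finite-difference table by the Newton binomial-coefficient closed
-- form computed in one pass (objective: faster). A mutates its argument in place (appends
-- the extrapolated values to nums); the equivalence proved here is about the RETURN value only.

-- ===== PORT A =====
-- inner for loop: new_round.append(rounds[cr][i] - rounds[cr][i-1]) for i in range(1, len);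
-- indices are always in range, so pyGetD is exact here
def pyDiff (l : List Int) : List Int :=
  (PySem.List.pyRange 1 (l.length : Int) 1).foldl
    (fun acc i => acc ++ [PySem.List.pyGetD l i 0 - PySem.List.pyGetD l (i - 1) 0]) []

-- length fact the recursion below needs for termination
theorem pyDiff_length (l : List Int) : (pyDiff l).length = ((l.length : Int) - 1).toNat := by
  unfold pyDiff
  rw [PySem.List.foldl_append_singleton_eq_map]
  simp [PySem.List.length_pyRange_one]

-- first while loop: keep appending difference rows until a row is all zeros
def buildRounds (l : List Int) : List (List Int) :=
  if l.all (fun x => x == 0) then [l]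
  else l :: buildRounds (pyDiff l)
termination_by l.length
decreasing_by
  have hne : l ≠ [] := by
    intro h; subst h; simp_all
  have : 0 < l.length := List.length_pos_iff.mpr hne
  rw [pyDiff_length]; omega

-- append [0, 0] to the bottom row; second while loop walks back up, appending
-- last + last-of-below and prepending head - head-of-below; yields the extended top row
def extendRounds : List (List Int) → List Int
  | [] => []
  | [r] => r ++ [0, 0]
  | r :: r2 :: rs =>
      let below := extendRounds (r2 :: rs)
      ((PySem.List.pyGet? r 0).getD 0 - (PySem.List.pyGet? below 0).getD 0) ::
        (r ++ [(PySem.List.pyGet? r (-1)).getD 0 + (PySem.List.pyGet? below (-1)).getD 0])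

def find_both_next (nums : List Int) : Int × Int :=
  let top := extendRounds (buildRounds nums)
  ((PySem.List.pyGet? top (-1)).getD 0, (PySem.List.pyGet? top 0).getD 0)

-- ===== PORT B =====
def find_both_next_alt (nums : List Int) : Int × Int :=
  let n : Int := (nums.length : Int)
  let r := (PySem.List.enumerate nums 0).foldl
    (fun (st : Int × Int × Int × Int × Int) (p : Int × Int) =>
      let c2 := PySem.Int.floordiv (st.2.2.1 * (n - p.1)) (p.1 + 1)
      (st.1 + st.2.2.2.1 * st.2.2.1 * p.2,
       st.2.1 + st.2.2.2.2 * c2 * p.2,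
       c2, -st.2.2.2.1, -st.2.2.2.2))
    (0, 0, 1, (if n % 2 == 1 then 1 else -1), 1)
  (r.1, r.2.1)

-- ===== PRECONDITION & SPEC =====
def Spec_find_both_next (nums : List Int) (out : Int × Int) : Prop := out = find_both_next_alt nums
instance (nums : List Int) (out : Int × Int) : Decidable (Spec_find_both_next nums out) := by unfold Spec_find_both_next; infer_instance

-- ===== CLAIM (what is proved, stated in full; the proofs are below) =====
def Claim_equal_find_both_next : Prop := ∀ (nums : List Int), Dom_find_both_next nums → Spec_find_both_next nums (find_both_next nums)

-- ===== LEMMAS AND PROOFS =====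

-- Newton forward value (next element) and backward value (previous element) as binomial sums
def NXT (l : List Int) : Int :=
  ∑ i ∈ Finset.range l.length, (-1 : Int) ^ (l.length - 1 - i) * (l.length.choose i : Int) * l.getD i 0

def PRV (l : List Int) : Int :=
  ∑ i ∈ Finset.range l.length, (-1 : Int) ^ i * (l.length.choose (i + 1) : Int) * l.getD i 0

theorem NXT_zero (l : List Int) (h : ∀ x ∈ l, x = 0) : NXT l = 0 := by
  unfold NXT
  refine Finset.sum_eq_zero (fun i hi => ?_)
  rw [Finset.mem_range] at hi
  rw [l.getD_eq_getElem 0 hi, h _ (l.getElem_mem hi), mul_zero]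

theorem PRV_zero (l : List Int) (h : ∀ x ∈ l, x = 0) : PRV l = 0 := by
  unfold PRV
  refine Finset.sum_eq_zero (fun i hi => ?_)
  rw [Finset.mem_range] at hi
  rw [l.getD_eq_getElem 0 hi, h _ (l.getElem_mem hi), mul_zero]

theorem pyDiff_getD (l : List Int) (i : Nat) (hi : i + 1 < l.length) :
    (pyDiff l).getD i 0 = l.getD (i + 1) 0 - l.getD i 0 := by
  unfold pyDiff
  rw [PySem.List.foldl_append_singleton_eq_map, List.nil_append]
  have hlt : i < ((PySem.List.pyRange 1 (l.length : Int) 1).map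
      (fun j => PySem.List.pyGetD l j 0 - PySem.List.pyGetD l (j - 1) 0)).length := by
    simp [PySem.List.length_pyRange_one]; omega
  rw [List.getD_eq_getElem _ _ hlt, List.getElem_map, PySem.List.getElem_pyRange_one]
  have h1 : (1 : Int) + i = ((i + 1 : Nat) : Int) := by push_cast; ring
  have h2 : ((i + 1 : Nat) : Int) - 1 = ((i : Nat) : Int) := by push_cast; ring
  rw [h1, PySem.List.pyGetD_natCast, h2, PySem.List.pyGetD_natCast]

theorem neg_one_pow_sub (m i : Nat) (h : i ≤ m) : (-1 : Int) ^ (m - i) = (-1) ^ m * (-1) ^ i := by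
  rw [← pow_add]
  have he : m + i = (m - i) + 2 * i := by omega
  rw [he, pow_add, pow_mul]
  norm_num

theorem keyT (m : Nat) (f : Nat → Int) :
    ∑ i ∈ Finset.range (m + 1), (-1 : Int) ^ i * ((m + 1).choose i : Int) * f i
      = ∑ i ∈ Finset.range (m + 1), (-1 : Int) ^ i * (m.choose i : Int) * f i
        - ∑ i ∈ Finset.range m, (-1 : Int) ^ i * (m.choose i : Int) * f (i + 1) := by
  rw [Finset.sum_range_succ' (fun i => (-1 : Int) ^ i * ((m + 1).choose i : Int) * f i),
      Finset.sum_range_succ' (fun i => (-1 : Int) ^ i * (m.choose i : Int) * f i)]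
  simp only [Nat.choose_succ_succ, Nat.choose_zero_right]
  rw [Finset.sum_congr rfl (fun i _ => by push_cast; ring :
    ∀ i ∈ Finset.range m, (-1 : Int) ^ (i+1) * ((m.choose i + m.choose (i+1) : Nat) : Int) * f (i+1)
      = (-1 : Int) ^ (i+1) * (m.choose (i+1) : Int) * f (i+1) - (-1 : Int) ^ i * (m.choose i : Int) * f (i + 1)),
    Finset.sum_sub_distrib]
  ring

theorem keyP (m : Nat) (f : Nat → Int) :
    ∑ i ∈ Finset.range (m + 1), (-1 : Int) ^ i * ((m + 1).choose (i + 1) : Int) * f i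
      = ∑ i ∈ Finset.range (m + 1), (-1 : Int) ^ i * (m.choose i : Int) * f i
        + ∑ i ∈ Finset.range m, (-1 : Int) ^ i * (m.choose (i + 1) : Int) * f i := by
  have h2 : ∑ i ∈ Finset.range (m+1), (-1 : Int) ^ i * (m.choose (i + 1) : Int) * f i
      = ∑ i ∈ Finset.range m, (-1 : Int) ^ i * (m.choose (i + 1) : Int) * f i := by
    rw [Finset.sum_range_succ, Nat.choose_eq_zero_of_lt (by omega)]
    simp
  rw [← h2, ← Finset.sum_add_distrib]
  refine Finset.sum_congr rfl (fun i _ => ?_)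
  rw [Nat.choose_succ_succ]
  push_cast; ring

theorem NXT_rec (l : List Int) (m : Nat) (hl : l.length = m + 1) :
    NXT l = l.getD m 0 + NXT (pyDiff l) := by
  have hdlen : (pyDiff l).length = m := by rw [pyDiff_length, hl]; simp
  unfold NXT
  rw [hl, hdlen]
  simp only [Nat.add_sub_cancel]
  -- left: sum with exponent (m - i); factor the sign
  rw [Finset.sum_congr rfl (fun i hi => by
        rw [neg_one_pow_sub m i (by rw [Finset.mem_range] at hi; omega)]; ring :
      ∀ i ∈ Finset.range (m + 1), (-1 : Int) ^ (m - i) * ((m+1).choose i : Int) * l.getD i 0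
        = (-1 : Int) ^ m * ((-1 : Int) ^ i * ((m+1).choose i : Int) * l.getD i 0)),
     ← Finset.mul_sum, keyT m (fun i => l.getD i 0)]
  rw [Finset.sum_congr rfl (fun i hi => by
        rw [Finset.mem_range] at hi
        rw [neg_one_pow_sub (m-1) i (by omega), pyDiff_getD l i (by omega)]; ring_nf :
      ∀ i ∈ Finset.range m, (-1 : Int) ^ (m - 1 - i) * (m.choose i : Int) * (pyDiff l).getD i 0
        = (-1 : Int) ^ (m-1) * ((-1 : Int) ^ i * (m.choose i : Int) * (l.getD (i+1) 0 - l.getD i 0))),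
     ← Finset.mul_sum]
  rw [Finset.sum_range_succ, Nat.choose_self]
  rcases Nat.eq_zero_or_pos m with hm | hm
  · subst hm; simp
  · have hs : (-1 : Int) ^ m = -(-1 : Int) ^ (m - 1) := by
      rw [neg_one_pow_sub m 1 hm]; ring
    rw [Finset.sum_congr rfl (fun i _ => by ring :
        ∀ i ∈ Finset.range m, (-1 : Int) ^ i * (m.choose i : Int) * (l.getD (i+1) 0 - l.getD i 0)
          = (-1 : Int) ^ i * (m.choose i : Int) * l.getD (i+1) 0
            - (-1 : Int) ^ i * (m.choose i : Int) * l.getD i 0),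
       Finset.sum_sub_distrib, hs]
    have hsq : ((-1 : Int) ^ (m - 1)) * ((-1 : Int) ^ (m - 1)) = 1 := by
      rw [← pow_add]
      exact Even.neg_one_pow ⟨m - 1, rfl⟩
    push_cast
    linear_combination (l.getD m 0 : Int) * hsq

theorem PRV_rec (l : List Int) (m : Nat) (hl : l.length = m + 1) :
    PRV l = l.getD 0 0 - PRV (pyDiff l) := by
  have hdlen : (pyDiff l).length = m := by rw [pyDiff_length, hl]; simp
  unfold PRV
  rw [hl, hdlen, keyP m (fun i => l.getD i 0)]
  rw [Finset.sum_congr rfl (fun i hi => by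
        rw [Finset.mem_range] at hi
        rw [pyDiff_getD l i (by omega)] :
      ∀ i ∈ Finset.range m, (-1 : Int) ^ i * (m.choose (i+1) : Int) * (pyDiff l).getD i 0
        = (-1 : Int) ^ i * (m.choose (i+1) : Int) * (l.getD (i+1) 0 - l.getD i 0))]
  have hre : ∑ i ∈ Finset.range m, (-1 : Int) ^ i * (m.choose (i+1) : Int) * l.getD (i+1) 0
      = l.getD 0 0 - ∑ i ∈ Finset.range (m+1), (-1 : Int) ^ i * (m.choose i : Int) * l.getD i 0 := by
    rw [Finset.sum_range_succ' (fun i => (-1 : Int) ^ i * (m.choose i : Int) * l.getD i 0)]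
    rw [Finset.sum_congr rfl (fun i _ => by ring :
      ∀ i ∈ Finset.range m, (-1 : Int) ^ (i+1) * (m.choose (i+1) : Int) * l.getD (i+1) 0
        = -((-1 : Int) ^ i * (m.choose (i+1) : Int) * l.getD (i+1) 0))]

    rw [Finset.sum_neg_distrib]
    simp
  rw [Finset.sum_congr rfl (fun i _ => by ring :
      ∀ i ∈ Finset.range m, (-1 : Int) ^ i * (m.choose (i+1) : Int) * (l.getD (i+1) 0 - l.getD i 0)
        = (-1 : Int) ^ i * (m.choose (i+1) : Int) * l.getD (i+1) 0
          - (-1 : Int) ^ i * (m.choose (i+1) : Int) * l.getD i 0),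
     Finset.sum_sub_distrib, hre]
  ring

theorem buildRounds_cons (l : List Int) : ∃ r rs, buildRounds l = r :: rs := by
  rw [buildRounds]
  split
  · exact ⟨l, [], rfl⟩
  · exact ⟨l, buildRounds (pyDiff l), rfl⟩

theorem A_zero (l : List Int) (h : l.all (fun x => x == 0)) : find_both_next l = (0, 0) := by
  unfold find_both_next
  rw [buildRounds, if_pos h]
  show ((PySem.List.pyGet? (extendRounds [l]) (-1)).getD 0, (PySem.List.pyGet? (extendRounds [l]) 0).getD 0) = (0, 0)
  have he : extendRounds [l] = (l ++ [0]) ++ [0] := by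
    rw [extendRounds]; simp
  rw [he, PySem.List.pyGet?_neg_one_append_singleton, PySem.List.pyGet?_zero]
  cases l with
  | nil => rfl
  | cons a t =>
    have ha : a = 0 := by simp [List.all_cons] at h; exact h.1
    simp [ha]

theorem A_rec (l : List Int) (h : ¬ l.all (fun x => x == 0)) :
    find_both_next l = (l.getD (l.length - 1) 0 + (find_both_next (pyDiff l)).1,
                        l.getD 0 0 - (find_both_next (pyDiff l)).2) := by
  have hne : l ≠ [] := by intro hn; subst hn; simp at h
  obtain ⟨r, rs, hbr⟩ := buildRounds_cons (pyDiff l)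
  have hb : buildRounds l = l :: r :: rs := by rw [buildRounds, if_neg h, hbr]
  unfold find_both_next
  rw [hb, hbr]
  have hext : extendRounds (l :: r :: rs)
      = ((PySem.List.pyGet? l 0).getD 0 - (PySem.List.pyGet? (extendRounds (r :: rs)) 0).getD 0) ::
        (l ++ [(PySem.List.pyGet? l (-1)).getD 0 + (PySem.List.pyGet? (extendRounds (r :: rs)) (-1)).getD 0]) := by
    rw [extendRounds]
  rw [hext]
  dsimp only
  set b1 := (PySem.List.pyGet? (extendRounds (r :: rs)) (-1)).getD 0 with hb1
  set b2 := (PySem.List.pyGet? (extendRounds (r :: rs)) 0).getD 0 with hb2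
  have htop1 : PySem.List.pyGet?
      (((PySem.List.pyGet? l 0).getD 0 - b2) :: (l ++ [(PySem.List.pyGet? l (-1)).getD 0 + b1])) (-1)
      = some ((PySem.List.pyGet? l (-1)).getD 0 + b1) := by
    rw [show (((PySem.List.pyGet? l 0).getD 0 - b2) :: (l ++ [(PySem.List.pyGet? l (-1)).getD 0 + b1]))
        = ((((PySem.List.pyGet? l 0).getD 0 - b2) :: l) ++ [(PySem.List.pyGet? l (-1)).getD 0 + b1]) by simp,
      PySem.List.pyGet?_neg_one_append_singleton]
  rw [htop1, PySem.List.pyGet?_zero]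
  have hg0 : (PySem.List.pyGet? l 0).getD 0 = l.getD 0 0 := by
    rw [PySem.List.pyGet?_zero]
    cases l with
    | nil => rfl
    | cons a t => rfl
  have hgl : (PySem.List.pyGet? l (-1)).getD 0 = l.getD (l.length - 1) 0 := by
    rw [PySem.List.pyGet?_neg_one, List.getLast?_eq_getElem?]
    cases l with
    | nil => simp at hne
    | cons a t =>
      rw [List.getD_eq_getElem?_getD]
  simp only [Option.getD_some]
  rw [hg0, hgl]
  simp

theorem B_fold (n : Nat) : ∀ (xs : List Int) (j : Nat), j + xs.length = n →
    ∀ (nxt prv c s t : Int),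
    (xs ≠ [] → c = (n.choose j : Int) ∧ s = (-1 : Int) ^ (n - 1 - j) ∧ t = (-1 : Int) ^ j) →
    ((PySem.List.enumerate xs (j : Int)).foldl
      (fun (st : Int × Int × Int × Int × Int) (p : Int × Int) =>
        let c2 := PySem.Int.floordiv (st.2.2.1 * ((n : Int) - p.1)) (p.1 + 1)
        (st.1 + st.2.2.2.1 * st.2.2.1 * p.2,
         st.2.1 + st.2.2.2.2 * c2 * p.2,
         c2, -st.2.2.2.1, -st.2.2.2.2))
      (nxt, prv, c, s, t)).1
      = nxt + ∑ i ∈ Finset.range xs.length,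
          (-1 : Int) ^ (n - 1 - (j + i)) * (n.choose (j + i) : Int) * xs.getD i 0
    ∧ ((PySem.List.enumerate xs (j : Int)).foldl
      (fun (st : Int × Int × Int × Int × Int) (p : Int × Int) =>
        let c2 := PySem.Int.floordiv (st.2.2.1 * ((n : Int) - p.1)) (p.1 + 1)
        (st.1 + st.2.2.2.1 * st.2.2.1 * p.2,
         st.2.1 + st.2.2.2.2 * c2 * p.2,
         c2, -st.2.2.2.1, -st.2.2.2.2))
      (nxt, prv, c, s, t)).2.1
      = prv + ∑ i ∈ Finset.range xs.length,
          (-1 : Int) ^ (j + i) * (n.choose (j + i + 1) : Int) * xs.getD i 0 := by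
  intro xs
  induction xs with
  | nil =>
    intro j hj nxt prv c s t hg
    simp [PySem.List.enumerate_nil]
  | cons a rest ih =>
    intro j hj nxt prv c s t hg
    obtain ⟨hc, hs, ht⟩ := hg (by simp)
    have hjn : j < n := by simp at hj; omega
    rw [PySem.List.enumerate_cons]
    have hc2 : PySem.Int.floordiv (c * ((n : Int) - (j : Int))) ((j : Int) + 1)
        = (n.choose (j + 1) : Int) := by
      have h1 : (n : Int) - (j : Int) = ((n - j : Nat) : Int) := by
        push_cast [Nat.cast_sub (le_of_lt hjn)]; ring
      have h2 : ((j : Int) + 1) = ((j + 1 : Nat) : Int) := by push_cast; ring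
      rw [hc, h1, h2, ← Nat.cast_mul, PySem.Int.floordiv_natCast]
      rw [← Nat.choose_succ_right_eq, Nat.mul_div_cancel _ (Nat.succ_pos j)]
    have hstep : ((j : Int) + 1) = (((j + 1 : Nat)) : Int) := by push_cast; ring
    simp only [List.foldl_cons]
    rw [show (PySem.List.enumerate rest ((j : Int) + 1)) = (PySem.List.enumerate rest (((j + 1 : Nat)) : Int)) by rw [hstep]]
    have := ih (j + 1) (by simp at hj ⊢; omega)
      (nxt + s * c * a)
      (prv + t * (PySem.Int.floordiv (c * ((n : Int) - (j : Int))) ((j : Int) + 1)) * a)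
      (PySem.Int.floordiv (c * ((n : Int) - (j : Int))) ((j : Int) + 1)) (-s) (-t)
      (fun hrest => by
        have hj1 : j + 1 + rest.length = n := by simp at hj; omega
        have hlt : j + 1 ≤ n - 1 := by
          have : rest.length ≠ 0 := by simpa [List.length_eq_zero_iff] using hrest
          omega
        refine ⟨hc2, ?_, ?_⟩
        · rw [hs, show n - 1 - j = (n - 1 - (j + 1)) + 1 by omega, pow_succ]; ring
        · rw [ht, pow_succ]; ring)
    refine ⟨?_, ?_⟩
    · rw [this.1]
      simp only [List.length_cons]
      rw [Finset.sum_range_succ' (fun i => (-1 : Int) ^ (n - 1 - (j + i)) * (n.choose (j + i) : Int) * (a :: rest).getD i 0)]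
      rw [Finset.sum_congr rfl (fun i _ => by
            rw [show j + (i + 1) = j + 1 + i by omega]
            simp :
          ∀ i ∈ Finset.range rest.length,
            (-1 : Int) ^ (n - 1 - (j + (i + 1))) * (n.choose (j + (i + 1)) : Int) * (a :: rest).getD (i + 1) 0
              = (-1 : Int) ^ (n - 1 - (j + 1 + i)) * (n.choose (j + 1 + i) : Int) * rest.getD i 0)]
      rw [hs, hc]
      simp [List.length_cons]
      ring
    · rw [this.2]
      simp only [List.length_cons]
      rw [Finset.sum_range_succ' (fun i => (-1 : Int) ^ (j + i) * (n.choose (j + i + 1) : Int) * (a :: rest).getD i 0)]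
      rw [Finset.sum_congr rfl (fun i _ => by
            rw [show j + (i + 1) = j + 1 + i by omega]
            simp :
          ∀ i ∈ Finset.range rest.length,
            (-1 : Int) ^ (j + (i + 1)) * (n.choose (j + (i + 1) + 1) : Int) * (a :: rest).getD (i + 1) 0
              = (-1 : Int) ^ (j + 1 + i) * (n.choose (j + 1 + i + 1) : Int) * rest.getD i 0)]
      rw [ht, hc2]
      simp [List.length_cons]
      ring

theorem B_eq (l : List Int) : find_both_next_alt l = (NXT l, PRV l) := by
  unfold find_both_next_alt
  dsimp only
  have h0 : (0 : Int) = ((0 : Nat) : Int) := rfl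
  have hg := B_fold l.length l 0 (by simp)
    0 0 1 (if (l.length : Int) % 2 == 1 then 1 else -1) 1
    (fun hne => by
      have hpos : 0 < l.length := List.length_pos_iff.mpr hne
      refine ⟨by simp, ?_, by simp⟩
      have hmod : ((l.length : Int) % 2 == 1) = decide (l.length % 2 = 1) := by
        rcases Nat.even_or_odd l.length with he | ho
        · have h2 : l.length % 2 = 0 := Nat.even_iff.mp he
          have : (l.length : Int) % 2 = 0 := by omega
          simp [this, h2]
        · have h2 : l.length % 2 = 1 := Nat.odd_iff.mp ho
          have : (l.length : Int) % 2 = 1 := by omega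
          simp [this, h2]
      rw [hmod]
      rcases Nat.even_or_odd l.length with he | ho
      · have h2 : l.length % 2 = 0 := Nat.even_iff.mp he
        have hodd : Odd (l.length - 1 - 0) := by
          rw [Nat.odd_iff]; omega
        rw [hodd.neg_one_pow]
        simp [h2]
      · have h2 : l.length % 2 = 1 := Nat.odd_iff.mp ho
        have heven : Even (l.length - 1 - 0) := by
          rw [Nat.even_iff]; omega
        rw [heven.neg_one_pow]
        simp [h2])
  rw [h0] at hg ⊢
  unfold NXT PRV
  rw [Prod.ext_iff]
  refine ⟨?_, ?_⟩
  · rw [hg.1]; simp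
  · rw [hg.2]; simp

theorem main_eq (n : Nat) : ∀ (l : List Int), l.length = n → find_both_next l = (NXT l, PRV l) := by
  induction n using Nat.strong_induction_on with
  | _ n ih =>
    intro l hl
    by_cases hz : l.all (fun x => x == 0)
    · have hall : ∀ x ∈ l, x = 0 := by
        intro x hx
        have := List.all_eq_true.mp hz x hx
        simpa using this
      rw [A_zero l hz, NXT_zero l hall, PRV_zero l hall]
    · have hne : l ≠ [] := by intro hn; subst hn; simp at hz
      obtain ⟨m, hm⟩ : ∃ m, l.length = m + 1 := by
        cases hx : l.length with
        | zero => exact absurd (List.length_eq_zero_iff.mp hx) hne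
        | succ k => exact ⟨k, rfl⟩
      have hdlen : (pyDiff l).length = m := by rw [pyDiff_length, hm]; simp
      have hih := ih m (by omega) (pyDiff l) hdlen
      rw [A_rec l hz, hih, NXT_rec l m hm, PRV_rec l m hm, hm]
      simp

-- ===== VERDICT (by name: the statement is the Claim_ definition above) =====
theorem find_both_next_spec : Claim_equal_find_both_next := by
  intro nums _
  unfold Spec_find_both_next
  rw [B_eq, main_eq nums.length nums rfl]
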